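-- pv_equiv track=rewrite | github.com/TheAnsarya/ffmq-info | tools/analysis/deduce_dte_spaces.py | find_word_boundaries
-- ===== SOURCE A (Python) =====
-- from typing import Dict, List, Tuple
--
-- def find_word_boundaries(text: str) -> List[int]:
-- 	"""
-- 	Find likely word boundaries in garbled text
-- 	Uses capitalization, known words, and English patterns
-- 	"""
--
-- 	boundaries = [0]  # Start is always a boundary
--
-- 	# Capital letters usually start words
-- 	for i, char in enumerate(text):
-- 		if char.isupper() and i > 0:
-- 			# Check if previous char is lowercase (camelCase pattern)
-- 			if text[i-1].islower():
-- 				boundaries.append(i)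
--
-- 	# Known complete words (from capitalization or context)
-- 	known_words = [
-- 		"Crystal", "Prophecy", "Mac", "Benjamin", "Kaeli",
-- 		"Phoebe", "Tristam", "Rainbow", "Road", "Hill",
-- 		"years", "been", "studying", "lake", "dried",
-- 		"ship", "ended", "rock", "ledge", "problem",
-- 		"dig", "from", "here", "able", "reach",
-- 		"Anyway", "key", "shield", "hidden",
-- 		"way", "back", "doing", "some", "research",
-- 		"Butthat", "But", "that",  # Compound
-- 	]
--
-- 	for word in known_words:
-- 		pos = text.find(word)
-- 		while pos != -1:
-- 			if pos not in boundaries: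
-- 				boundaries.append(pos)
-- 			if pos + len(word) not in boundaries:
-- 				boundaries.append(pos + len(word))
-- 			pos = text.find(word, pos + 1)
--
-- 	boundaries.sort()
-- 	return boundaries
-- ===== SOURCE B (Python) =====
-- # One unified left-to-right position scan with a set: at each index test the camelCase
-- # rule and every known word via startswith, then return sorted(set). Replaces A's
-- # per-word find() rescans and list membership tests.
-- _KNOWN_WORDS = (
--     "Crystal", "Prophecy", "Mac", "Benjamin", "Kaeli",
--     "Phoebe", "Tristam", "Rainbow", "Road", "Hill",
--     "years", "been", "studying", "lake", "dried",
--     "ship", "ended", "rock", "ledge", "problem",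
--     "dig", "from", "here", "able", "reach",
--     "Anyway", "key", "shield", "hidden",
--     "way", "back", "doing", "some", "research",
--     "Butthat", "But", "that",
-- )
--
-- def find_word_boundaries(text: str):
--     bounds = {0}
--     n = len(text)
--     for i in range(n):
--         if text[i].isupper() and i > 0 and text[i - 1].islower():
--             bounds.add(i)
--         for word in _KNOWN_WORDS:
--             if text.startswith(word, i):
--                 bounds.add(i)
--                 bounds.add(i + len(word))
--     return sorted(bounds)
-- ===== Notes on version B (the rewrite author's own statement) =====
-- stated objective: idiomatic
-- what changed: Replaces A's per-word text.find() while-loops and list membership scans with one left-to-right index pass that tests the camelCase rule and text.startswith(word, i) for every known word at each position, accumulating positions in a set and returning sorted(set).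
import Mathlib
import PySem

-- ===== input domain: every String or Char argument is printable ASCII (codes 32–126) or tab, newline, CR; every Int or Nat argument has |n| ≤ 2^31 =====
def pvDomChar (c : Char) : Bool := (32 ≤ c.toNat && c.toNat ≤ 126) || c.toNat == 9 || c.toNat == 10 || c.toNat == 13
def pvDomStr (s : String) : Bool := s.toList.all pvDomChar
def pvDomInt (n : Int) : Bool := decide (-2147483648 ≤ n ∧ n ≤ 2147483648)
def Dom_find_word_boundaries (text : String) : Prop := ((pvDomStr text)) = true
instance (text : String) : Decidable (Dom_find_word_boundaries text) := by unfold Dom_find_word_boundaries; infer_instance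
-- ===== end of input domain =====

-- B replaces A's per-word find() while-loops and list membership scans by one index
-- pass over the text that tests every known word with startswith at each position,
-- collecting boundaries in a set and returning sorted(set) (objective: idiomatic).

-- ===== PORT A =====
def knownWordsA : List String :=
  ["Crystal", "Prophecy", "Mac", "Benjamin", "Kaeli",
   "Phoebe", "Tristam", "Rainbow", "Road", "Hill",
   "years", "been", "studying", "lake", "dried",
   "ship", "ended", "rock", "ledge", "problem",
   "dig", "from", "here", "able", "reach",
   "Anyway", "key", "shield", "hidden",
   "way", "back", "doing", "some", "research",
   "Butthat", "But", "that"]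

-- the camelCase loop: for i, char in enumerate(text): …
-- (text[i-1] is always in range when i > 0, so Option.any is exact there)
def camelPassA (s : List Char) : List Int :=
  (PySem.List.enumerate s).foldl
    (fun b ic =>
      if PySem.Str.isupper ic.2 && decide ((0:Int) < ic.1) then
        if (PySem.List.pyGet? s (ic.1 - 1)).any PySem.Str.islower then b ++ [ic.1] else b
      else b)
    [(0 : Int)]

-- the 'while pos != -1' loop for one word; fuel |s|+1 bounds the strictly increasing pos
def wordScanA (s w : List Char) : Nat → Int → List Int → List Int
  | 0, _, b => b
  | fuel+1, pos, b =>
    if pos = -1 then b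
    else
      let b1 := if pos ∈ b then b else b ++ [pos]
      let b2 := if pos + (w.length : Int) ∈ b1 then b1 else b1 ++ [pos + (w.length : Int)]
      wordScanA s w fuel (PySem.Chars.findFrom s w (pos + 1)) b2

def wordPassA (s : List Char) (b : List Int) : List Int :=
  knownWordsA.foldl
    (fun b word => wordScanA s word.toList (s.length + 1) (PySem.Chars.find s word.toList) b) b

def find_word_boundaries (text : String) : List Int :=
  PySem.List.sorted (wordPassA text.toList (camelPassA text.toList)) id

-- ===== PORT B =====
def knownWordsB : List String :=
  ["Crystal", "Prophecy", "Mac", "Benjamin", "Kaeli",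
   "Phoebe", "Tristam", "Rainbow", "Road", "Hill",
   "years", "been", "studying", "lake", "dried",
   "ship", "ended", "rock", "ledge", "problem",
   "dig", "from", "here", "able", "reach",
   "Anyway", "key", "shield", "hidden",
   "way", "back", "doing", "some", "research",
   "Butthat", "But", "that"]

-- text.startswith(word, i) with 0 ≤ i is exactly startswith on the i-dropped text
def find_word_boundaries_alt (text : String) : List Int :=
  let s := text.toList
  let res := (PySem.List.pyRange 0 s.length 1).foldl
    (fun st i =>
      let st1 :=
        if (PySem.List.pyGet? s i).any PySem.Str.isupper && decide ((0:Int) < i)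
            && (PySem.List.pyGet? s (i - 1)).any PySem.Str.islower
        then st.add i else st
      knownWordsB.foldl
        (fun st2 word =>
          if PySem.Chars.startswith (List.drop i.toNat s) word.toList
          then (st2.add i).add (i + (word.toList.length : Int))
          else st2)
        st1)
    (PySem.Set.ofList [0])
  PySem.List.sorted res id

-- ===== PRECONDITION & SPEC =====
def Spec_find_word_boundaries (text : String) (out : List Int) : Prop := out = find_word_boundaries_alt text
instance (text : String) (out : List Int) : Decidable (Spec_find_word_boundaries text out) := by unfold Spec_find_word_boundaries; infer_instance

-- ===== CLAIM (what is proved, stated in full; the proofs are below) =====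
def Claim_equal_find_word_boundaries : Prop := ∀ (text : String), Dom_find_word_boundaries text → Spec_find_word_boundaries text (find_word_boundaries text)

-- ===== LEMMAS AND PROOFS =====

-- the camelCase condition, as the port's Boolean test
def camelCond (s : List Char) (i : Int) : Bool :=
  (PySem.List.pyGet? s i).any PySem.Str.isupper && decide ((0:Int) < i)
    && (PySem.List.pyGet? s (i - 1)).any PySem.Str.islower

-- the boundary set both programs compute
def BP (s : List Char) (x : Int) : Prop :=
  x = 0 ∨ (∃ k : Nat, k < s.length ∧ camelCond s (k : Int) = true ∧ x = (k : Int)) ∨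
    (∃ w ∈ knownWordsA, ∃ p : Nat, w.toList <+: s.drop p ∧
      (x = (p : Int) ∨ x = (p : Int) + (w.toList.length : Int)))

lemma enumerate_mem (s : List Char) (st : Int) (ic : Int × Char) :
    ic ∈ PySem.List.enumerate s st ↔ ∃ k : Nat, k < s.length ∧ ic = (st + k, s.getD k ' ') := by
  induction s generalizing st with
  | nil => simp [PySem.List.enumerate]
  | cons c t ih =>
    simp only [PySem.List.enumerate, List.mem_cons, ih]
    constructor
    · rintro (rfl | ⟨k, hk, rfl⟩)
      · exact ⟨0, by simp⟩
      · exact ⟨k+1, by simpa using hk, by push_cast; simp [add_assoc]; ring⟩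
    · rintro ⟨k, hk, rfl⟩
      cases k with
      | zero => left; simp
      | succ k => right; exact ⟨k, by simpa using hk, by push_cast; simp [add_assoc]; ring⟩

lemma enumerate_pairwise (s : List Char) (st : Int) :
    List.Pairwise (fun a b => a.1 < b.1) (PySem.List.enumerate s st) := by
  induction s generalizing st with
  | nil => simp [PySem.List.enumerate]
  | cons c t ih =>
    simp only [PySem.List.enumerate, List.pairwise_cons]
    refine ⟨fun b hb => ?_, ih _⟩
    obtain ⟨k, hk, rfl⟩ := (enumerate_mem t (st+1) b).1 hb
    simp; omega



lemma pairCond_eq (s : List Char) (ic : Int × Char) (h : ic ∈ PySem.List.enumerate s 0) :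
    ((PySem.Str.isupper ic.2 && decide ((0:Int) < ic.1)) &&
      (PySem.List.pyGet? s (ic.1 - 1)).any PySem.Str.islower) = camelCond s ic.1 := by
  obtain ⟨k, hk, rfl⟩ := (enumerate_mem s 0 ic).1 h
  simp only [camelCond, zero_add]
  have h1 : PySem.List.pyGet? s ((k:Int)) = s[k]? := PySem.List.pyGet?_natCast s k
  have h2 : s[k]? = some (s.getD k ' ') := by
    rw [List.getElem?_eq_getElem hk, List.getD_eq_getElem s ' ' hk]
  rw [h1, h2]
  simp [Option.any]

lemma camelPassA_eq (s : List Char) :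
    camelPassA s = [0] ++ ((PySem.List.enumerate s).filter (fun ic => camelCond s ic.1)).map (·.1) := by
  unfold camelPassA
  rw [PySem.List.foldl_congr_mem (PySem.List.enumerate s) _
    (fun b (ic : Int × Char) => if camelCond s ic.1 = true then b ++ [ic.1] else b) _ ?_]
  · exact PySem.List.foldl_append_if (fun ic => camelCond s ic.1) (·.1) (PySem.List.enumerate s) [0]
  · intro acc ic hic
    show _ = (if camelCond s ic.1 = true then acc ++ [ic.1] else acc)
    rw [← pairCond_eq s ic hic]
    rcases h1 : PySem.Str.isupper ic.2 && decide ((0:Int) < ic.1) with _|_ <;>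
      rcases h2 : (PySem.List.pyGet? s (ic.1 - 1)).any PySem.Str.islower with _|_ <;> simp

lemma camelPassA_mem (s : List Char) (x : Int) :
    x ∈ camelPassA s ↔ x = 0 ∨ ∃ k : Nat, k < s.length ∧ camelCond s (k : Int) = true ∧ x = (k : Int) := by
  rw [camelPassA_eq]
  simp only [List.cons_append, List.nil_append, List.mem_cons, List.mem_map, List.mem_filter]
  refine or_congr Iff.rfl ⟨?_, ?_⟩
  · rintro ⟨ic, ⟨hic, hc⟩, rfl⟩
    obtain ⟨k, hk, rfl⟩ := (enumerate_mem s 0 ic).1 hic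
    exact ⟨k, hk, by simpa using hc, by simp⟩
  · rintro ⟨k, hk, hc, rfl⟩
    exact ⟨((k:Int), s.getD k ' '), ⟨(enumerate_mem s 0 _).2 ⟨k, hk, by simp⟩, hc⟩, rfl⟩

lemma camelPassA_nodup (s : List Char) : (camelPassA s).Nodup := by
  rw [camelPassA_eq]
  have hpw : List.Pairwise (fun a b : Int × Char => a.1 < b.1)
      ((PySem.List.enumerate s).filter (fun ic => camelCond s ic.1)) :=
    (enumerate_pairwise s 0).sublist List.filter_sublist
  have hlt : List.Pairwise (· < ·)
      (((PySem.List.enumerate s).filter (fun ic => camelCond s ic.1)).map (·.1)) := by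
    rw [List.pairwise_map]; exact hpw
  simp only [List.cons_append, List.nil_append, List.nodup_cons]
  refine ⟨?_, hlt.imp ne_of_lt⟩
  simp only [List.mem_map, List.mem_filter]
  rintro ⟨ic, ⟨hic, hc⟩, h0⟩
  simp only [camelCond, h0] at hc
  simp at hc

lemma mem_if_append (b : List Int) (y x : Int) :
    (x ∈ if y ∈ b then b else b ++ [y]) ↔ x ∈ b ∨ x = y := by
  split_ifs with h
  · constructor
    · exact fun hx => Or.inl hx
    · rintro (hx | rfl) <;> assumption
  · simp

lemma nodup_if_append (b : List Int) (y : Int) (h : b.Nodup) :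
    (if y ∈ b then b else b ++ [y]).Nodup := by
  split_ifs with hy
  · exact h
  · simp only [List.nodup_append, h, true_and]
    refine ⟨List.nodup_singleton y, ?_⟩
    intro a ha z hz
    simp only [List.mem_singleton] at hz
    subst hz
    intro e
    rw [e] at ha
    exact hy ha


lemma wordScanA_nodup (s w : List Char) (fuel : Nat) (pos : Int) (b : List Int) (h : b.Nodup) :
    (wordScanA s w fuel pos b).Nodup := by
  induction fuel generalizing pos b with
  | zero => exact h
  | succ f ih =>
    rw [wordScanA]
    by_cases h1 : pos = -1
    · rw [if_pos h1]; exact h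
    · rw [if_neg h1]
      exact ih _ _ (nodup_if_append _ _ (nodup_if_append _ _ h))

-- occurrences of w at positions ≥ k are exactly occurrences of w inside s.drop k
lemma exists_occ_iff (s w : List Char) (k : Nat) :
    (∃ p : Nat, k ≤ p ∧ w <+: s.drop p) ↔ w <:+: s.drop k := by
  rw [← PySem.Chars.isIn_iff_infix, ← PySem.Chars.exists_prefix_drop_iff_isIn]
  constructor
  · rintro ⟨p, hkp, hp⟩
    exact ⟨p - k, by rwa [List.drop_drop, Nat.add_sub_cancel' hkp]⟩
  · rintro ⟨j, hj⟩
    exact ⟨k + j, Nat.le_add_right _ _, by rwa [List.drop_drop] at hj⟩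

lemma wordScanA_mem (s w : List Char) (hw : w ≠ []) (k : Nat) (hk : k ≤ s.length)
    (fuel : Nat) (hfuel : s.length + 1 - k ≤ fuel) (b : List Int) (x : Int) :
    x ∈ wordScanA s w fuel (PySem.Chars.findFrom s w (k : Int)) b ↔
      x ∈ b ∨ ∃ p : Nat, k ≤ p ∧ w <+: s.drop p ∧ (x = (p : Int) ∨ x = (p : Int) + (w.length : Int)) := by
  induction fuel generalizing k b with
  | zero => omega
  | succ f ih =>
    rw [wordScanA]
    by_cases hneg : PySem.Chars.findFrom s w (k : Int) = -1
    · rw [if_pos hneg]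
      rw [PySem.Chars.findFrom_natCast_eq_neg_one_iff s w k hk] at hneg
      rw [← exists_occ_iff] at hneg
      constructor
      · exact Or.inl
      · rintro (hx | ⟨p, hkp, hp, _⟩)
        · exact hx
        · exact absurd ⟨p, hkp, hp⟩ hneg
    · rw [if_neg hneg]
      obtain ⟨hge, hpre, hmin⟩ := PySem.Chars.findFrom_natCast_spec s w k hk hneg
      set pos := PySem.Chars.findFrom s w (k : Int) with hpos
      have hpos0 : 0 ≤ pos := le_trans (Int.natCast_nonneg k) hge
      have hq : pos = ((pos.toNat : Nat) : Int) := by omega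
      have hqpre : w <+: s.drop pos.toNat := hpre
      have hqlt : pos.toNat < s.length := by
        by_contra hge'
        have hnil : s.drop pos.toNat = [] := List.drop_eq_nil_of_le (by omega)
        rw [hnil] at hqpre
        exact hw (List.prefix_nil.mp hqpre)
      have hstep : pos + 1 = ((pos.toNat + 1 : Nat) : Int) := by omega
      dsimp only
      rw [hstep, ih (pos.toNat + 1) hqlt (by omega), mem_if_append, mem_if_append]
      have hkq : k ≤ pos.toNat := by omega
      constructor
      · rintro (((hx | rfl) | rfl) | ⟨p, hp1, hp2, hp3⟩)
        · exact Or.inl hx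
        · exact Or.inr ⟨pos.toNat, hkq, hqpre, Or.inl (by omega)⟩
        · exact Or.inr ⟨pos.toNat, hkq, hqpre, Or.inr (by omega)⟩
        · exact Or.inr ⟨p, by omega, hp2, hp3⟩
      · rintro (hx | ⟨p, hp1, hp2, (rfl | rfl)⟩)
        · exact Or.inl (Or.inl (Or.inl hx))
        · rcases Nat.lt_or_ge p (pos.toNat + 1) with hlt | hge2
          · have hpq : p = pos.toNat := by
              rcases Nat.lt_or_ge p pos.toNat with h'' | h''
              · exact absurd hp2 (hmin p hp1 h'')
              · omega
            subst hpq
            exact Or.inl (Or.inl (Or.inr (by omega)))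
          · exact Or.inr ⟨p, by omega, hp2, Or.inl rfl⟩
        · rcases Nat.lt_or_ge p (pos.toNat + 1) with hlt | hge2
          · have hpq : p = pos.toNat := by
              rcases Nat.lt_or_ge p pos.toNat with h'' | h''
              · exact absurd hp2 (hmin p hp1 h'')
              · omega
            subst hpq
            exact Or.inl (Or.inr (by omega))
          · exact Or.inr ⟨p, by omega, hp2, Or.inr rfl⟩

lemma wordFoldA_nodup (s : List Char) (ws : List String) (b : List Int) (h : b.Nodup) :
    (ws.foldl (fun b word =>
      wordScanA s word.toList (s.length + 1) (PySem.Chars.find s word.toList) b) b).Nodup := by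
  induction ws generalizing b with
  | nil => exact h
  | cons w t ih => exact ih _ (wordScanA_nodup _ _ _ _ _ h)

lemma wordFoldA_mem (s : List Char) (ws : List String) (hws : ∀ w ∈ ws, w.toList ≠ [])
    (b : List Int) (x : Int) :
    (x ∈ ws.foldl (fun b word =>
        wordScanA s word.toList (s.length + 1) (PySem.Chars.find s word.toList) b) b) ↔
      x ∈ b ∨ ∃ w ∈ ws, ∃ p : Nat, w.toList <+: s.drop p ∧
        (x = (p : Int) ∨ x = (p : Int) + (w.toList.length : Int)) := by
  induction ws generalizing b with
  | nil => simp
  | cons w t ih =>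
    simp only [List.foldl_cons]
    rw [ih (fun u hu => hws u (List.mem_cons_of_mem _ hu))]
    have h0 : PySem.Chars.find s w.toList = PySem.Chars.findFrom s w.toList ((0 : Nat) : Int) := by
      rw [Nat.cast_zero, PySem.Chars.findFrom_zero]
    rw [h0, wordScanA_mem s w.toList (hws w (List.mem_cons_self ..)) 0 (Nat.zero_le _) _ (by omega)]
    constructor
    · rintro ((hx | ⟨p, _, hp2, hp3⟩) | ⟨u, hu, hrest⟩)
      · exact Or.inl hx
      · exact Or.inr ⟨w, List.mem_cons_self .., p, hp2, hp3⟩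
      · exact Or.inr ⟨u, List.mem_cons_of_mem _ hu, hrest⟩
    · rintro (hx | ⟨u, hu, hrest⟩)
      · exact Or.inl (Or.inl hx)
      · rcases List.mem_cons.mp hu with rfl | hu'
        · obtain ⟨p, hp2, hp3⟩ := hrest
          exact Or.inl (Or.inr ⟨p, Nat.zero_le _, hp2, hp3⟩)
        · exact Or.inr ⟨u, hu', hrest⟩


lemma altWordFold_mem (s : List Char) (i : Int) (ws : List String) (st : PySem.Set Int) (x : Int) :
    (x ∈ ws.foldl (fun st2 word =>
        if PySem.Chars.startswith (List.drop i.toNat s) word.toList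
        then (st2.add i).add (i + (word.toList.length : Int)) else st2) st) ↔
      x ∈ st ∨ ∃ w ∈ ws, PySem.Chars.startswith (List.drop i.toNat s) w.toList = true ∧
        (x = i ∨ x = i + (w.toList.length : Int)) := by
  induction ws generalizing st with
  | nil => simp
  | cons w t ih =>
    simp only [List.foldl_cons]
    rw [ih]
    by_cases hsw : PySem.Chars.startswith (List.drop i.toNat s) w.toList
    · rw [if_pos hsw]
      rw [PySem.Set.mem_add, PySem.Set.mem_add]
      constructor
      · rintro (((hx | rfl) | rfl) | ⟨u, hu, hrest⟩)
        · exact Or.inl hx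
        · exact Or.inr ⟨w, List.mem_cons_self .., hsw, Or.inl rfl⟩
        · exact Or.inr ⟨w, List.mem_cons_self .., hsw, Or.inr rfl⟩
        · exact Or.inr ⟨u, List.mem_cons_of_mem _ hu, hrest⟩
      · rintro (hx | ⟨u, hu, hc, hor⟩)
        · exact Or.inl (Or.inl (Or.inl hx))
        · rcases List.mem_cons.mp hu with rfl | hu'
          · rcases hor with rfl | rfl
            · exact Or.inl (Or.inl (Or.inr rfl))
            · exact Or.inl (Or.inr rfl)
          · exact Or.inr ⟨u, hu', hc, hor⟩
    · rw [if_neg hsw]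
      constructor
      · rintro (hx | ⟨u, hu, hrest⟩)
        · exact Or.inl hx
        · exact Or.inr ⟨u, List.mem_cons_of_mem _ hu, hrest⟩
      · rintro (hx | ⟨u, hu, hc, hor⟩)
        · exact Or.inl hx
        · rcases List.mem_cons.mp hu with rfl | hu'
          · exact absurd hc (by simpa using hsw)
          · exact Or.inr ⟨u, hu', hc, hor⟩

lemma altWordFold_nodup (s : List Char) (i : Int) (ws : List String) (st : PySem.Set Int)
    (h : List.Nodup st) :
    List.Nodup (ws.foldl (fun (st2 : PySem.Set Int) word =>
        if PySem.Chars.startswith (List.drop i.toNat s) word.toList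
        then (st2.add i).add (i + (word.toList.length : Int)) else st2) st) := by
  induction ws generalizing st with
  | nil => exact h
  | cons w t ih =>
    simp only [List.foldl_cons]
    by_cases hsw : PySem.Chars.startswith (List.drop i.toNat s) w.toList
    · rw [if_pos hsw]; exact ih _ (PySem.Set.nodup_add _ _ (PySem.Set.nodup_add _ _ h))
    · rw [if_neg hsw]; exact ih _ h

lemma B_fold_mem (s : List Char) (n : Nat) (st : PySem.Set Int) (x : Int) :
    (x ∈ (PySem.List.pyRange 0 (n : Int) 1).foldl
      (fun (st : PySem.Set Int) (i : Int) =>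
        let st1 := if camelCond s i then PySem.Set.add st i else st
        knownWordsB.foldl
          (fun (st2 : PySem.Set Int) word =>
            if PySem.Chars.startswith (List.drop i.toNat s) word.toList
            then (st2.add i).add (i + (word.toList.length : Int)) else st2) st1) st) ↔
      x ∈ st ∨ ∃ k : Nat, k < n ∧
        ((camelCond s (k : Int) = true ∧ x = (k : Int)) ∨
          ∃ w ∈ knownWordsB, PySem.Chars.startswith (List.drop k s) w.toList = true ∧
            (x = (k : Int) ∨ x = (k : Int) + (w.toList.length : Int))) := by
  induction n generalizing st with
  | zero => simp [PySem.List.pyRange]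
  | succ n ih =>
    have hsplit : PySem.List.pyRange 0 ((n + 1 : Nat) : Int) 1 =
        PySem.List.pyRange 0 (n : Int) 1 ++ [(n : Int)] := by
      push_cast
      exact PySem.List.pyRange_one_succ_right (Int.natCast_nonneg n)
    rw [hsplit, List.foldl_append, List.foldl_cons, List.foldl_nil]
    dsimp only
    rw [altWordFold_mem]
    have htn : ((n : Int)).toNat = n := Int.toNat_natCast n
    rw [htn]
    constructor
    · rintro (hmem | ⟨u, hu, hrest⟩)
      · by_cases hc : camelCond s (n : Int)
        · rw [if_pos hc, PySem.Set.mem_add] at hmem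
          rcases hmem with hmem | rfl
          · rcases (ih st).1 hmem with hx | ⟨k, hk, hdet⟩
            · exact Or.inl hx
            · exact Or.inr ⟨k, by omega, hdet⟩
          · exact Or.inr ⟨n, by omega, Or.inl ⟨hc, rfl⟩⟩
        · rw [if_neg hc] at hmem
          rcases (ih st).1 hmem with hx | ⟨k, hk, hdet⟩
          · exact Or.inl hx
          · exact Or.inr ⟨k, by omega, hdet⟩
      · exact Or.inr ⟨n, by omega, Or.inr ⟨u, hu, hrest⟩⟩
    · rintro (hx | ⟨k, hk, hdet⟩)
      · left
        have hin : x ∈ (PySem.List.pyRange 0 (n : Int) 1).foldl _ st := (ih st).2 (Or.inl hx)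
        by_cases hc : camelCond s (n : Int)
        · rw [if_pos hc, PySem.Set.mem_add]; exact Or.inl hin
        · rw [if_neg hc]; exact hin
      · rcases Nat.lt_or_ge k n with hkn | hkn
        · have hin : x ∈ (PySem.List.pyRange 0 (n : Int) 1).foldl _ st :=
            (ih st).2 (Or.inr ⟨k, hkn, hdet⟩)
          left
          by_cases hc : camelCond s (n : Int)
          · rw [if_pos hc, PySem.Set.mem_add]; exact Or.inl hin
          · rw [if_neg hc]; exact hin
        · have hkn' : k = n := by omega
          subst hkn'
          rcases hdet with ⟨hc, rfl⟩ | ⟨u, hu, hrest⟩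
          · left
            rw [if_pos hc, PySem.Set.mem_add]
            exact Or.inr rfl
          · exact Or.inr ⟨u, hu, hrest⟩

lemma A_mem (s : List Char) (x : Int) : x ∈ wordPassA s (camelPassA s) ↔ BP s x := by
  unfold wordPassA BP
  rw [wordFoldA_mem s knownWordsA (by decide) _ x, camelPassA_mem]
  rw [or_assoc]

lemma A_nodup (s : List Char) : (wordPassA s (camelPassA s)).Nodup :=
  wordFoldA_nodup s knownWordsA _ (camelPassA_nodup s)

lemma B_fold_nodup (s : List Char) (n : Nat) (st : PySem.Set Int) (h : List.Nodup st) :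
    List.Nodup ((PySem.List.pyRange 0 (n : Int) 1).foldl
      (fun (st : PySem.Set Int) (i : Int) =>
        let st1 := if camelCond s i then PySem.Set.add st i else st
        knownWordsB.foldl
          (fun (st2 : PySem.Set Int) word =>
            if PySem.Chars.startswith (List.drop i.toNat s) word.toList
            then (st2.add i).add (i + (word.toList.length : Int)) else st2) st1) st) := by
  induction n generalizing st with
  | zero => simpa [PySem.List.pyRange] using h
  | succ n ih =>
    have hsplit : PySem.List.pyRange 0 ((n + 1 : Nat) : Int) 1 =
        PySem.List.pyRange 0 (n : Int) 1 ++ [(n : Int)] := by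
      push_cast
      exact PySem.List.pyRange_one_succ_right (Int.natCast_nonneg n)
    rw [hsplit, List.foldl_append, List.foldl_cons, List.foldl_nil]
    dsimp only
    apply altWordFold_nodup
    split_ifs with hc
    · exact PySem.Set.nodup_add _ _ (ih st h)
    · exact ih st h

-- a nonempty word occurring as a prefix of s.drop p forces p < s.length
lemma occ_lt_length (s w : List Char) (hw : w ≠ []) (p : Nat) (hp : w <+: s.drop p) :
    p < s.length := by
  by_contra hge
  have hnil : s.drop p = [] := List.drop_eq_nil_of_le (by omega)
  rw [hnil] at hp
  exact hw (List.prefix_nil.mp hp)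

lemma B_mem (s : List Char) (x : Int) :
    (x ∈ (PySem.List.pyRange 0 (s.length : Int) 1).foldl
      (fun (st : PySem.Set Int) (i : Int) =>
        let st1 := if camelCond s i then PySem.Set.add st i else st
        knownWordsB.foldl
          (fun (st2 : PySem.Set Int) word =>
            if PySem.Chars.startswith (List.drop i.toNat s) word.toList
            then (st2.add i).add (i + (word.toList.length : Int)) else st2) st1)
      (PySem.Set.ofList [0])) ↔ BP s x := by
  rw [B_fold_mem s s.length]
  have h0 : x ∈ PySem.Set.ofList [(0 : Int)] ↔ x = 0 := by
    rw [PySem.Set.mem_ofList]; simp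
  rw [h0]
  unfold BP
  constructor
  · rintro (rfl | ⟨k, hk, ⟨hc, rfl⟩ | ⟨w, hw, hsw, hor⟩⟩)
    · exact Or.inl rfl
    · exact Or.inr (Or.inl ⟨k, hk, hc, rfl⟩)
    · refine Or.inr (Or.inr ⟨w, by rw [show knownWordsA = knownWordsB from rfl]; exact hw, k, ?_, hor⟩)
      exact (PySem.Chars.startswith_iff _ _).1 hsw
  · rintro (rfl | ⟨k, hk, hc, rfl⟩ | ⟨w, hw, p, hp, hor⟩)
    · exact Or.inl rfl
    · exact Or.inr ⟨k, hk, Or.inl ⟨hc, rfl⟩⟩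
    · have hw' : w.toList ≠ [] := by
        revert hw
        have : ∀ u ∈ knownWordsA, u.toList ≠ [] := by decide
        exact fun hw => this w hw
      refine Or.inr ⟨p, occ_lt_length s w.toList hw' p hp, Or.inr
        ⟨w, by rw [show knownWordsB = knownWordsA from rfl]; exact hw,
         (PySem.Chars.startswith_iff _ _).2 hp, hor⟩⟩

-- ===== VERDICT (by name: the statement is the Claim_ definition above) =====
theorem find_word_boundaries_spec : Claim_equal_find_word_boundaries := by
  intro text _hdom
  show find_word_boundaries text = find_word_boundaries_alt text
  unfold find_word_boundaries find_word_boundaries_alt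
  dsimp only
  set s := text.toList with hs
  set lA := wordPassA s (camelPassA s) with hlA
  have hBnodup := B_fold_nodup s s.length (PySem.Set.ofList [0]) (PySem.Set.nodup_ofList _)
  have hBA : ∀ a : Int, (a ∈ (PySem.List.pyRange 0 (s.length : Int) 1).foldl
      (fun (st : PySem.Set Int) (i : Int) =>
        let st1 := if camelCond s i then PySem.Set.add st i else st
        knownWordsB.foldl
          (fun (st2 : PySem.Set Int) word =>
            if PySem.Chars.startswith (List.drop i.toNat s) word.toList
            then (st2.add i).add (i + (word.toList.length : Int)) else st2) st1)
      (PySem.Set.ofList [0])) ↔ a ∈ lA := by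
    intro a
    rw [B_mem s a, hlA, A_mem s a]
  set lB := (PySem.List.pyRange 0 (s.length : Int) 1).foldl
      (fun (st : PySem.Set Int) (i : Int) =>
        let st1 := if camelCond s i then PySem.Set.add st i else st
        knownWordsB.foldl
          (fun (st2 : PySem.Set Int) word =>
            if PySem.Chars.startswith (List.drop i.toNat s) word.toList
            then (st2.add i).add (i + (word.toList.length : Int)) else st2) st1)
      (PySem.Set.ofList [0]) with hlB
  have hperm : lB.Perm lA := (List.perm_ext_iff_of_nodup hBnodup (A_nodup s)).2 hBA
  have hys : (PySem.List.sorted lB id).Perm lA := (PySem.List.sorted_perm lB id false).trans hperm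
  have hnd : (PySem.List.sorted lB id).Nodup :=
    ((PySem.List.sorted_perm lB id false).nodup_iff).2 hBnodup
  have hlt : List.Pairwise (fun a b : Int => id a < id b) (PySem.List.sorted lB id) :=
    ((PySem.List.sorted_pairwise lB id).and hnd).imp (fun h => lt_of_le_of_ne h.1 h.2)
  exact PySem.List.sorted_eq_of_perm_of_pairwise_lt lA (PySem.List.sorted lB id) id hys hlt
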